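-- pv_equiv track=rewrite | github.com/benjamin-kroeger/dna-labeling-benchmark | src/dna_segmentation_benchmark/eval/junction_errors.py | _count_cascades
-- ===== SOURCE A (Python) =====
-- def _count_cascades(
--     residuals: list[tuple[int, int]],
--     min_run: int = 3,
-- ) -> int:
--     """Count cascade shift occurrences in boundary residual sequences.
--
--     A cascade is a run of ``min_run`` or more consecutive residuals with
--     the same sign on the 5' component.
--     """
--     if len(residuals) < min_run:
--         return 0
--
--     signs = [1 if r[0] > 0 else (-1 if r[0] < 0 else 0) for r in residuals]
--     count = 0
--     run_len = 1
--
--     for i in range(1, len(signs)):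
--         if signs[i] != 0 and signs[i] == signs[i - 1]:
--             run_len += 1
--         else:
--             if run_len >= min_run:
--                 count += 1
--             run_len = 1
--
--     if run_len >= min_run:
--         count += 1
--
--     return count
-- ===== SOURCE B (Python) =====
-- def _count_cascades(
--     residuals: list[tuple[int, int]],
--     min_run: int = 3,
-- ) -> int:
--     """Count cascades by detecting run starts: a position i is counted when a
--     maximal run of >= min_run equal nonzero signs begins there, checked with a
--     lookahead window scan instead of run-length accumulation."""
--     signs = [(a > 0) - (a < 0) for a, _ in residuals]
--     m = max(min_run, 1)
--     n = len(signs)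
--     return sum(
--         1
--         for i, s in enumerate(signs)
--         if s != 0
--         and (i == 0 or signs[i - 1] != s)
--         and i + m <= n
--         and all(x == s for x in signs[i + 1 : i + m])
--     )
-- ===== Notes on version B (the rewrite author's own statement) =====
-- stated objective: alternative
-- what changed: Replaced A's run-length accumulator state machine (count/run_len counters plus a trailing-run check) by run-start detection: for each position, a lookahead window comparison signs[i+1:i+m] == [s]*(m-1) together with a boundary test on the previous sign decides whether a qualifying cascade starts there; no run-length state is carried.
-- intended difference: When min_run <= 1, A counts every zero-sign residual as its own length-1 'run' (and returns 1 on the empty list when min_run <= 0, a phantom run), inflating the count; B never counts zero-sign positions, which is the intended count of same-nonzero-sign cascades per the docstring. — e.g. on _count_cascades([(0, 0)], 1): A returns 1, B returns 0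
import Mathlib
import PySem

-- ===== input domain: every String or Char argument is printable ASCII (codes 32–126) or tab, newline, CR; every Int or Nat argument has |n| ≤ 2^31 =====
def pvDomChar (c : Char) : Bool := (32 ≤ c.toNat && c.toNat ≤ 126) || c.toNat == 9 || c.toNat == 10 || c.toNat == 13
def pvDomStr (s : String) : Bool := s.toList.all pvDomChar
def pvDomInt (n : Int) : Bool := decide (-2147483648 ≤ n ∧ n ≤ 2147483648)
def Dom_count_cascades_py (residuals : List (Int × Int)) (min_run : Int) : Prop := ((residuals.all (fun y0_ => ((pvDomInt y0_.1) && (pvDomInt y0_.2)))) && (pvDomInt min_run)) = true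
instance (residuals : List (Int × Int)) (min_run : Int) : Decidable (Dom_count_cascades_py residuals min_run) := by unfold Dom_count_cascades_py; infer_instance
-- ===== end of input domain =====

-- B replaces A's run-length accumulator state machine by run-start detection:
-- each position is tested with a lookahead window comparison (alternative decomposition).

-- ===== PORT A =====
-- A's sign of the 5' component: 1 if r[0] > 0 else (-1 if r[0] < 0 else 0)
def pvSignA (r : Int × Int) : Int := if r.1 > 0 then 1 else if r.1 < 0 then -1 else 0

-- the for-loop over i in range(1, len(signs)) with state (count, run_len), carrying signs[i-1] as prev
def pvALoop (min_run : Int) : Int → Int → Int → List Int → Int × Int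
  | count, run_len, _prev, [] => (count, run_len)
  | count, run_len, prev, s :: rest =>
    if s ≠ 0 ∧ s = prev then pvALoop min_run count (run_len + 1) s rest
    else pvALoop min_run (if run_len ≥ min_run then count + 1 else count) 1 s rest

def count_cascades_py (residuals : List (Int × Int)) (min_run : Int) : Int :=
  if (residuals.length : Int) < min_run then 0
  else
    let signs := residuals.map pvSignA
    let st : Int × Int :=
      match signs with
      | [] => (0, 1)
      | h :: t => pvALoop min_run 0 1 h t
    if st.2 ≥ min_run then st.1 + 1 else st.1

-- ===== PORT B =====
-- B's sign: (a > 0) - (a < 0)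
def pvSignB (r : Int × Int) : Int := (if r.1 > 0 then 1 else 0) - (if r.1 < 0 then 1 else 0)

-- sum(1 for i, s in enumerate(signs) if s != 0 and (i == 0 or signs[i-1] != s)
--     and signs[i+1:i+m] == [s] * (m-1)); signs[i-1] is read only under i != 0, so it is in range
def count_cascades_py_alt (residuals : List (Int × Int)) (min_run : Int) : Int :=
  let signs := residuals.map pvSignB
  let m := max min_run 1
  let n := PySem.List.len signs
  (PySem.List.enumerate signs 0).foldl
    (fun acc p =>
      if p.2 ≠ 0 ∧ (p.1 = 0 ∨ PySem.List.pyGetD signs (p.1 - 1) 0 ≠ p.2) ∧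
          p.1 + m ≤ n ∧
          (PySem.List.slice signs (some (p.1 + 1)) (some (p.1 + m))).all (fun x => x == p.2) = true
      then acc + 1 else acc) 0

-- ===== PRECONDITION & SPEC =====
-- When min_run ≤ 1, A counts every zero-sign residual as its own length-1 "run" (and returns 1
-- on the empty list when min_run ≤ 0, a phantom run), inflating the count; B never counts
-- zero-sign positions, the intended count of same-nonzero-sign cascades per the docstring.
def D_count_cascades_py (residuals : List (Int × Int)) (min_run : Int) : Prop :=
  (min_run ≤ 1 ∧ ∃ r ∈ residuals, r.1 = 0) ∨ (min_run ≤ 0 ∧ residuals = [])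
instance (residuals : List (Int × Int)) (min_run : Int) : Decidable (D_count_cascades_py residuals min_run) := by
  unfold D_count_cascades_py; infer_instance

def Spec_count_cascades_py (residuals : List (Int × Int)) (min_run : Int) (out : Int) : Prop :=
  ¬ D_count_cascades_py residuals min_run → out = count_cascades_py_alt residuals min_run
instance (residuals : List (Int × Int)) (min_run : Int) (out : Int) : Decidable (Spec_count_cascades_py residuals min_run out) := by
  unfold Spec_count_cascades_py; infer_instance

def pvDiffWitness_count_cascades_py : (List (Int × Int)) × Int := ([(0, 0)], 1)
def pvDiffWitnessOut_count_cascades_py : Int × Int := (1, 0)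

-- ===== CLAIM (what is proved, stated in full; the proofs are below) =====
def Claim_unchanged_count_cascades_py : Prop := ∀ (residuals : List (Int × Int)) (min_run : Int), Dom_count_cascades_py residuals min_run → Spec_count_cascades_py residuals min_run (count_cascades_py residuals min_run)
def Claim_changed_count_cascades_py : Prop := Dom_count_cascades_py (pvDiffWitness_count_cascades_py.1) (pvDiffWitness_count_cascades_py.2) ∧ D_count_cascades_py (pvDiffWitness_count_cascades_py.1) (pvDiffWitness_count_cascades_py.2) ∧ count_cascades_py (pvDiffWitness_count_cascades_py.1) (pvDiffWitness_count_cascades_py.2) = pvDiffWitnessOut_count_cascades_py.1 ∧ count_cascades_py_alt (pvDiffWitness_count_cascades_py.1) (pvDiffWitness_count_cascades_py.2) = pvDiffWitnessOut_count_cascades_py.2 ∧ pvDiffWitnessOut_count_cascades_py.1 ≠ pvDiffWitnessOut_count_cascades_py.2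
def Claim_exact_count_cascades_py : Prop := ∀ (residuals : List (Int × Int)) (min_run : Int), Dom_count_cascades_py residuals min_run → D_count_cascades_py residuals min_run → count_cascades_py residuals min_run ≠ count_cascades_py_alt residuals min_run

-- ===== LEMMAS AND PROOFS =====

-- the two sign maps agree
lemma pvSign_eq (r : Int × Int) : pvSignA r = pvSignB r := by
  unfold pvSignA pvSignB; split_ifs <;> omega

lemma pvSignA_eq_zero {r : Int × Int} : pvSignA r = 0 ↔ r.1 = 0 := by
  unfold pvSignA
  rcases lt_trichotomy r.1 0 with h | h | h
  · rw [if_neg (by omega), if_pos h]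
    constructor <;> intro hh <;> omega
  · rw [if_neg (by omega), if_neg (by omega)]
    constructor <;> intro hh <;> omega
  · rw [if_pos h]
    constructor <;> intro hh <;> omega

-- A's trailing-run check
def pvFin (min_run : Int) (st : Int × Int) : Int := if st.2 ≥ min_run then st.1 + 1 else st.1

lemma pvALoop_nil (mr c rl p : Int) : pvALoop mr c rl p [] = (c, rl) := rfl

lemma pvALoop_cons (mr c rl p s : Int) (rest : List Int) :
    pvALoop mr c rl p (s :: rest)
      = if s ≠ 0 ∧ s = p then pvALoop mr c (rl + 1) s rest
        else pvALoop mr (if rl ≥ mr then c + 1 else c) 1 s rest := rfl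

-- PROOF-SIDE reference count: maximal runs (key, length) of the sign list, counted when
-- the key is nonzero and the length is ≥ min_run. Both ports are reduced to this.
def pvRunsAux : Int → Int → List Int → List (Int × Int)
  | k, n, [] => [(k, n)]
  | k, n, x :: xs => if x = k then pvRunsAux k (n + 1) xs else (k, n) :: pvRunsAux x 1 xs

def pvRuns : List Int → List (Int × Int)
  | [] => []
  | x :: xs => pvRunsAux x 1 xs

def pvCountRuns (min_run : Int) : List (Int × Int) → Int
  | [] => 0
  | g :: gs => (if g.1 ≠ 0 ∧ g.2 ≥ min_run then 1 else 0) + pvCountRuns min_run gs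

lemma pvRunsAux_nil (k n : Int) : pvRunsAux k n [] = [(k, n)] := rfl

lemma pvRunsAux_cons (k n x : Int) (xs : List Int) :
    pvRunsAux k n (x :: xs)
      = if x = k then pvRunsAux k (n + 1) xs else (k, n) :: pvRunsAux x 1 xs := rfl

lemma pvCountRuns_cons (mr : Int) (g : Int × Int) (gs : List (Int × Int)) :
    pvCountRuns mr (g :: gs) = (if g.1 ≠ 0 ∧ g.2 ≥ mr then 1 else 0) + pvCountRuns mr gs := rfl

-- counting runs of key 0 ignores the accumulated length
lemma countRuns_runsAux_zero (mr : Int) : ∀ (xs : List Int) (m m' : Int),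
    pvCountRuns mr (pvRunsAux 0 m xs) = pvCountRuns mr (pvRunsAux 0 m' xs) := by
  intro xs
  induction xs with
  | nil => intro m m'; simp [pvRunsAux, pvCountRuns]
  | cons x xs ih =>
    intro m m'
    by_cases hx : x = 0
    · subst hx; simp only [pvRunsAux]; exact ih _ _
    · rw [pvRunsAux_cons, pvRunsAux_cons, if_neg hx, if_neg hx,
          pvCountRuns_cons, pvCountRuns_cons]
      omega

-- A-side loop invariant outside D: A's finalized loop equals count plus the run count
lemma pvMain (mr : Int) : ∀ (rest : List Int) (prev count run_len : Int),
    (prev = 0 → run_len = 1) →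
    (2 ≤ mr ∨ (prev ≠ 0 ∧ ∀ s ∈ rest, s ≠ 0)) →
    pvFin mr (pvALoop mr count run_len prev rest)
      = count + pvCountRuns mr (pvRunsAux prev run_len rest) := by
  intro rest
  induction rest with
  | nil =>
    intro prev count run_len hz H
    rw [pvALoop_nil, pvRunsAux_nil, pvCountRuns_cons]
    simp only [pvCountRuns, pvFin]
    by_cases hp : prev = 0
    · have h1 := hz hp
      have h2 : 2 ≤ mr := by
        rcases H with h | ⟨h, _⟩
        · exact h
        · exact absurd hp h
      rw [if_neg (by omega : ¬ run_len ≥ mr), if_neg (by simp [hp])]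
      omega
    · by_cases hge : run_len ≥ mr
      · rw [if_pos hge, if_pos ⟨hp, hge⟩]; omega
      · rw [if_neg hge, if_neg (fun h => hge h.2)]; omega
  | cons s rest ih =>
    intro prev count run_len hz H
    rw [pvALoop_cons, pvRunsAux_cons]
    rcases eq_or_ne s prev with hsp | hsp
    · subst hsp
      by_cases hs0 : s = 0
      · subst hs0
        have h2 : 2 ≤ mr := by
          rcases H with h | ⟨h, _⟩
          · exact h
          · exact absurd rfl h
        have h1 : run_len = 1 := hz rfl
        rw [if_neg (by simp), if_pos rfl, if_neg (by omega : ¬ run_len ≥ mr)]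
        rw [ih 0 count 1 (fun _ => rfl) (Or.inl h2)]
        rw [countRuns_runsAux_zero mr rest 1 (run_len + 1)]
      · have H' : 2 ≤ mr ∨ (s ≠ 0 ∧ ∀ t ∈ rest, t ≠ 0) := by
          rcases H with h | ⟨h1, h2⟩
          · exact Or.inl h
          · exact Or.inr ⟨hs0, fun t ht => h2 t (List.mem_cons_of_mem _ ht)⟩
        rw [if_pos ⟨hs0, rfl⟩, if_pos rfl]
        exact ih s count (run_len + 1) (fun h => absurd h hs0) H'
    · have H' : 2 ≤ mr ∨ (s ≠ 0 ∧ ∀ t ∈ rest, t ≠ 0) := by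
        rcases H with h | ⟨h1, h2⟩
        · exact Or.inl h
        · exact Or.inr ⟨h2 s List.mem_cons_self, fun t ht => h2 t (List.mem_cons_of_mem _ ht)⟩
      rw [if_neg (fun h => hsp h.2), if_neg hsp]
      rw [ih s (if run_len ≥ mr then count + 1 else count) 1 (fun _ => rfl) H']
      simp only [pvCountRuns_cons]
      by_cases hp : prev = 0
      · have h1 := hz hp
        have h2 : 2 ≤ mr := by
          rcases H with h | ⟨h, _⟩
          · exact h
          · exact absurd hp h
        split_ifs <;> omega
      · split_ifs <;> omega

-- every run length produced is bounded by the list length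
lemma pvRunsAux_len_le : ∀ (xs : List Int) (k n : Int), 1 ≤ n → ∀ (g : Int × Int),
    g ∈ pvRunsAux k n xs → g.2 ≤ n + xs.length := by
  intro xs
  induction xs with
  | nil =>
    intro k n _ g hg
    rw [pvRunsAux_nil] at hg
    rw [List.mem_singleton.mp hg]
    simp
  | cons x xs ih =>
    intro k n hn g hg
    rw [pvRunsAux_cons] at hg
    by_cases h : x = k
    · rw [if_pos h] at hg
      have := ih k (n + 1) (by omega) g hg
      simp only [List.length_cons]
      push_cast
      omega
    · rw [if_neg h] at hg
      rcases List.mem_cons.mp hg with h1 | h1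
      · rw [h1]
        simp only [List.length_cons]
        push_cast
        have : (0 : Int) ≤ (xs.length : Int) := Int.natCast_nonneg _
        omega
      · have := ih x 1 (by omega) g h1
        simp only [List.length_cons]
        push_cast
        omega

-- every run length produced is at least 1
lemma pvRunsAux_len_pos : ∀ (xs : List Int) (k n : Int), 1 ≤ n → ∀ (g : Int × Int),
    g ∈ pvRunsAux k n xs → 1 ≤ g.2 := by
  intro xs
  induction xs with
  | nil =>
    intro k n hn g hg
    rw [pvRunsAux_nil] at hg
    rw [List.mem_singleton.mp hg]
    exact hn
  | cons x xs ih =>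
    intro k n hn g hg
    rw [pvRunsAux_cons] at hg
    by_cases h : x = k
    · rw [if_pos h] at hg
      exact ih k (n + 1) (by omega) g hg
    · rw [if_neg h] at hg
      rcases List.mem_cons.mp hg with h1 | h1
      · rw [h1]; exact hn
      · exact ih x 1 (by omega) g h1

lemma pvCountRuns_zero (mr : Int) : ∀ (gs : List (Int × Int)),
    (∀ g ∈ gs, g.2 < mr) → pvCountRuns mr gs = 0 := by
  intro gs
  induction gs with
  | nil => intro _; rfl
  | cons g gs ih =>
    intro h
    rw [pvCountRuns_cons,
        if_neg (fun hh => absurd hh.2 (by have := h g List.mem_cons_self; omega)),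
        ih (fun g hg => h g (List.mem_cons_of_mem _ hg))]
    omega

-- clamping min_run to at least 1 does not change the count on runs of length ≥ 1
lemma pvCountRuns_clamp (mr : Int) : ∀ (gs : List (Int × Int)),
    (∀ g ∈ gs, 1 ≤ g.2) → pvCountRuns (max mr 1) gs = pvCountRuns mr gs := by
  intro gs
  induction gs with
  | nil => intro _; rfl
  | cons g gs ih =>
    intro h
    rw [pvCountRuns_cons, pvCountRuns_cons, ih (fun g hg => h g (List.mem_cons_of_mem _ hg))]
    have h1 := h g List.mem_cons_self
    by_cases hz : g.1 = 0
    · rw [if_neg (fun hh => hh.1 hz), if_neg (fun hh => hh.1 hz)]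
    · by_cases hge : g.2 ≥ mr
      · rw [if_pos ⟨hz, by omega⟩, if_pos ⟨hz, hge⟩]
      · rw [if_neg (fun hh => by omega : ¬ (g.1 ≠ 0 ∧ g.2 ≥ max mr 1)), if_neg (fun hh => hge hh.2)]

-- length of the maximal constant-k prefix
def pvLead (k : Int) : List Int → Nat
  | [] => 0
  | x :: xs => if x = k then pvLead k xs + 1 else 0

-- B's window comparison characterized by the lead length
lemma pvTake_eq_replicate (s : Int) : ∀ (xs : List Int) (w : Nat),
    (xs.take w = List.replicate w s ↔ w ≤ pvLead s xs) := by
  intro xs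
  induction xs with
  | nil =>
    intro w
    simp only [List.take_nil, pvLead]
    constructor
    · intro h
      have := (List.replicate_eq_nil_iff s).mp h.symm
      omega
    · intro h
      have hw : w = 0 := by omega
      simp [hw]
  | cons x xs ih =>
    intro w
    cases w with
    | zero => simp [pvLead]
    | succ w' =>
      simp only [List.take_succ_cons, List.replicate_succ, List.cons.injEq, pvLead]
      by_cases hx : x = s
      · rw [if_pos hx]
        constructor
        · intro ⟨_, h2⟩; have := (ih w').mp h2; omega
        · intro h; exact ⟨hx, (ih w').mpr (by omega)⟩
      · rw [if_neg hx]
        constructor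
        · intro ⟨h1, _⟩; exact absurd h1 hx
        · intro h; omega

-- the window test "complete and all equal" is the replicate equation
lemma pvTake_all (s : Int) : ∀ (xs : List Int) (w : Nat),
    (xs.take w = List.replicate w s) ↔ ((xs.take w).all (fun x => x == s) = true ∧ w ≤ xs.length) := by
  intro xs
  induction xs with
  | nil =>
    intro w
    simp only [List.take_nil, List.all_nil, List.length_nil, true_and]
    constructor
    · intro h
      have := (List.replicate_eq_nil_iff s).mp h.symm
      omega
    · intro h
      have hw : w = 0 := by omega
      simp [hw]
  | cons x xs ih =>
    intro w
    cases w with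
    | zero => simp
    | succ w' =>
      simp only [List.take_succ_cons, List.replicate_succ, List.cons.injEq, List.all_cons,
        Bool.and_eq_true, beq_iff_eq, List.length_cons]
      rw [ih w']
      constructor
      · intro ⟨h1, h2, h3⟩; exact ⟨⟨h1, h2⟩, by omega⟩
      · intro ⟨⟨h1, h2⟩, h3⟩; exact ⟨h1, h2, by omega⟩

-- B's per-position count over a suffix, given the previous sign (window form)
def pvCnt (w : Nat) : Option Int → List Int → Int
  | _, [] => 0
  | prev, s :: rest =>
      (if s ≠ 0 ∧ prev ≠ some s ∧ rest.take w = List.replicate w s then 1 else 0)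
        + pvCnt w (some s) rest

-- the same count with the window condition replaced by the lead length
def pvCntL (m : Int) : Option Int → List Int → Int
  | _, [] => 0
  | prev, s :: rest =>
      (if s ≠ 0 ∧ prev ≠ some s ∧ m ≤ 1 + (pvLead s rest : Int) then 1 else 0)
        + pvCntL m (some s) rest

lemma pvCnt_eq_cntL (m : Int) (_hm : 1 ≤ m) : ∀ (xs : List Int) (prev : Option Int),
    pvCnt (m - 1).toNat prev xs = pvCntL m prev xs := by
  intro xs
  induction xs with
  | nil => intro prev; rfl
  | cons s rest ih =>
    intro prev
    simp only [pvCnt, pvCntL, ih]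
    congr 1
    have hw : rest.take (m - 1).toNat = List.replicate (m - 1).toNat s ↔ m ≤ 1 + (pvLead s rest : Int) := by
      rw [pvTake_eq_replicate s rest, Int.toNat_le]
      omega
    by_cases h1 : s ≠ 0 ∧ prev ≠ some s
    · by_cases h2 : m ≤ 1 + (pvLead s rest : Int)
      · rw [if_pos ⟨h1.1, h1.2, hw.mpr h2⟩, if_pos ⟨h1.1, h1.2, h2⟩]
      · rw [if_neg (fun hh => h2 (hw.mp hh.2.2)), if_neg (fun hh => h2 hh.2.2)]
    · rw [if_neg (fun hh => h1 ⟨hh.1, hh.2.1⟩), if_neg (fun hh => h1 ⟨hh.1, hh.2.1⟩)]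

-- the lead-form count equals the run count (invariant over an open run of sign k, length n)
lemma pvCntL_runsAux (m : Int) : ∀ (xs : List Int) (k n : Int),
    pvCountRuns m (pvRunsAux k n xs)
      = (if k ≠ 0 ∧ m ≤ n + (pvLead k xs : Int) then 1 else 0) + pvCntL m (some k) xs := by
  intro xs
  induction xs with
  | nil =>
    intro k n
    rw [pvRunsAux_nil, pvCountRuns_cons]
    simp only [pvCountRuns, pvCntL, pvLead, Nat.cast_zero, add_zero, ge_iff_le]
  | cons x rest ih =>
    intro k n
    rw [pvRunsAux_cons]
    by_cases hx : x = k
    · subst hx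
      rw [if_pos rfl, ih x (n + 1)]
      simp only [pvCntL, pvLead]
      push_cast
      have harr : n + ((pvLead x rest : Int) + 1) = n + 1 + (pvLead x rest : Int) := by ring
      rw [harr,
        if_neg (show ¬(x ≠ 0 ∧ some x ≠ some x ∧ m ≤ 1 + (pvLead x rest : Int)) from fun hh => hh.2.1 rfl),
        zero_add]
    · rw [if_neg hx, pvCountRuns_cons, ih x 1]
      simp only [pvCntL, pvLead, if_neg hx, Nat.cast_zero, add_zero, ge_iff_le]
      have hks : some k ≠ some x := fun h => hx (Option.some_inj.mp h).symm
      by_cases h2 : x ≠ 0 ∧ m ≤ 1 + (pvLead x rest : Int)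
      · rw [if_pos h2, if_pos (show x ≠ 0 ∧ some k ≠ some x ∧ m ≤ 1 + (pvLead x rest : Int) from ⟨h2.1, hks, h2.2⟩)]
      · rw [if_neg h2, if_neg (show ¬(x ≠ 0 ∧ some k ≠ some x ∧ m ≤ 1 + (pvLead x rest : Int)) from fun hh => h2 ⟨hh.1, hh.2.2⟩)]

lemma pvCntL_eq_countRuns (m : Int) (xs : List Int) :
    pvCntL m none xs = pvCountRuns m (pvRuns xs) := by
  cases xs with
  | nil => rfl
  | cons x rest =>
    simp only [pvRuns, pvCntL]
    rw [pvCntL_runsAux m rest x 1]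
    by_cases hc : x ≠ 0 ∧ m ≤ 1 + (pvLead x rest : Int)
    · rw [if_pos ⟨hc.1, (by simp : (none : Option Int) ≠ some x), hc.2⟩, if_pos hc]
    · rw [if_neg (fun hh => hc ⟨hh.1, hh.2.2⟩), if_neg hc]

-- localization of B's absolute-index predicate to the current suffix
lemma pvLoc (m : Int) (hm : 1 ≤ m) (signs : List Int) :
    ∀ (suf pre : List Int), signs = pre ++ suf →
    ((List.countP
       (fun p => decide (p.2 ≠ 0 ∧ (p.1 = 0 ∨ PySem.List.pyGetD signs (p.1 - 1) 0 ≠ p.2) ∧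
          p.1 + m ≤ PySem.List.len signs ∧
          (PySem.List.slice signs (some (p.1 + 1)) (some (p.1 + m))).all (fun x => x == p.2) = true))
       (PySem.List.enumerate suf (pre.length : Int))) : Int)
      = pvCnt (m - 1).toNat pre.getLast? suf := by
  intro suf
  induction suf with
  | nil =>
    intro pre _
    rw [PySem.List.enumerate_nil]
    rfl
  | cons s rest ih =>
    intro pre hsigns
    rw [PySem.List.enumerate_cons, List.countP_cons]
    have hlen : ((pre ++ [s]).length : Int) = (pre.length : Int) + 1 := by
      simp
    have hIH := ih (pre ++ [s]) (by rw [hsigns]; simp)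
    rw [hlen] at hIH
    rw [List.getLast?_concat] at hIH
    -- the head predicate equals the local window condition
    have hhead :
        (decide (s ≠ 0 ∧ ((pre.length : Int) = 0 ∨ PySem.List.pyGetD signs ((pre.length : Int) - 1) 0 ≠ s) ∧
            (pre.length : Int) + m ≤ PySem.List.len signs ∧
            (PySem.List.slice signs (some ((pre.length : Int) + 1)) (some ((pre.length : Int) + m))).all (fun x => x == s) = true))
          = decide (s ≠ 0 ∧ pre.getLast? ≠ some s ∧ rest.take (m - 1).toNat = List.replicate (m - 1).toNat s) := by
      have hslice : PySem.List.slice signs (some ((pre.length : Int) + 1)) (some ((pre.length : Int) + m))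
          = rest.take (m - 1).toNat := by
        rw [PySem.List.slice_toNat signs (by positivity) (by omega)]
        have h1 : ((pre.length : Int) + 1).toNat = pre.length + 1 := by omega
        have h2 : ((pre.length : Int) + m).toNat - ((pre.length : Int) + 1).toNat = (m - 1).toNat := by omega
        rw [h2, h1, hsigns]
        have : pre ++ s :: rest = (pre ++ [s]) ++ rest := by simp
        rw [this]
        have hl : pre.length + 1 = (pre ++ [s]).length := by simp
        rw [hl, List.drop_left]
      have hlensigns : PySem.List.len signs = (pre.length : Int) + 1 + rest.length := by
        rw [PySem.List.len_eq, hsigns]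
        push_cast [List.length_append, List.length_cons]
        ring
      have hwin : ((pre.length : Int) + m ≤ PySem.List.len signs ∧
            (rest.take (m - 1).toNat).all (fun x => x == s) = true)
          ↔ rest.take (m - 1).toNat = List.replicate (m - 1).toNat s := by
        rw [pvTake_all s rest, hlensigns]
        constructor
        · intro ⟨h1, h2⟩; exact ⟨h2, by omega⟩
        · intro ⟨h1, h2⟩; exact ⟨by omega, h1⟩
      have hor : ((pre.length : Int) = 0 ∨ PySem.List.pyGetD signs ((pre.length : Int) - 1) 0 ≠ s)
          ↔ pre.getLast? ≠ some s := by
        cases hpre : pre with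
        | nil =>
          simp
        | cons a pre' =>
          have hne : pre ≠ [] := by rw [hpre]; exact List.cons_ne_nil a pre'
          have hL : 1 ≤ pre.length := by rw [hpre]; simp
          have hcast : (pre.length : Int) - 1 = ((pre.length - 1 : Nat) : Int) := by omega
          have hget : PySem.List.pyGetD signs ((pre.length : Int) - 1) 0 = pre.getLast hne := by
            rw [hcast, PySem.List.pyGetD_natCast, hsigns]
            have hlt : pre.length - 1 < (pre ++ s :: rest).length := by
              simp; omega
            rw [List.getD_eq_getElem _ 0 hlt]
            rw [List.getElem_append_left (by omega : pre.length - 1 < pre.length)]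
            rw [List.getLast_eq_getElem hne]
          rw [← hpre]
          rw [List.getLast?_eq_some_getLast hne]
          constructor
          · intro h hc
            rcases h with h | h
            · rw [hpre] at h; simp at h; omega
            · exact h (by rw [hget]; exact Option.some_inj.mp hc)
          · intro h
            right
            rw [hget]
            intro hc
            exact h (by rw [hc])
      rw [hslice]
      congr 1
      rw [eq_iff_iff]
      constructor
      · intro ⟨h1, h2, h3, h4⟩; exact ⟨h1, hor.mp h2, hwin.mp ⟨h3, h4⟩⟩
      · intro ⟨h1, h2, h3⟩; exact ⟨h1, hor.mpr h2, (hwin.mpr h3).1, (hwin.mpr h3).2⟩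
    rw [hhead]
    simp only [pvCnt]
    push_cast
    rw [hIH]
    by_cases hc : s ≠ 0 ∧ pre.getLast? ≠ some s ∧ rest.take (m - 1).toNat = List.replicate (m - 1).toNat s
    · rw [if_pos hc, if_pos (by exact decide_eq_true hc)]
      omega
    · rw [if_neg hc, if_neg (by simpa using hc)]
      omega

-- B's port equals the reference run count
lemma pvAlt_eq (residuals : List (Int × Int)) (min_run : Int) :
    count_cascades_py_alt residuals min_run
      = pvCountRuns min_run (pvRuns (residuals.map pvSignA)) := by
  unfold count_cascades_py_alt
  have hsgn : residuals.map pvSignB = residuals.map pvSignA :=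
    List.map_congr_left (fun r _ => (pvSign_eq r).symm)
  simp only [hsgn]
  set signs := residuals.map pvSignA with hs
  set m := max min_run 1 with hmdef
  have hm : 1 ≤ m := le_max_right _ _
  rw [PySem.List.foldl_ite_add_one
      (fun p : Int × Int => p.2 ≠ 0 ∧ (p.1 = 0 ∨ PySem.List.pyGetD signs (p.1 - 1) 0 ≠ p.2) ∧
          p.1 + m ≤ PySem.List.len signs ∧
          (PySem.List.slice signs (some (p.1 + 1)) (some (p.1 + m))).all (fun x => x == p.2) = true)]
  have := pvLoc m hm signs signs [] (by simp)
  simp only [List.length_nil, Nat.cast_zero, List.getLast?_nil] at this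
  rw [zero_add, this, pvCnt_eq_cntL m hm, pvCntL_eq_countRuns]
  -- remove the clamp: every run length is ≥ 1
  cases hxs : signs with
  | nil => rfl
  | cons x rest =>
    simp only [pvRuns]
    exact pvCountRuns_clamp min_run _ (pvRunsAux_len_pos rest x 1 (by omega))

lemma pvAlt_small (residuals : List (Int × Int)) (min_run : Int)
    (h : (residuals.length : Int) < min_run) :
    count_cascades_py_alt residuals min_run = 0 := by
  rw [pvAlt_eq]
  cases hs : residuals.map pvSignA with
  | nil => simp [pvRuns, pvCountRuns]
  | cons x xs =>
    simp only [pvRuns]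
    apply pvCountRuns_zero
    intro g hg
    have := pvRunsAux_len_le xs x 1 (by omega) g hg
    have hlen : residuals.length = xs.length + 1 := by
      have := congrArg List.length hs
      simpa using this
    omega

-- number of zeros in the sign list
def pvZeros : List Int → Int
  | [] => 0
  | x :: xs => (if x = 0 then 1 else 0) + pvZeros xs

lemma pvZeros_cons (x : Int) (xs : List Int) :
    pvZeros (x :: xs) = (if x = 0 then 1 else 0) + pvZeros xs := rfl

lemma pvZeros_nonneg : ∀ xs, 0 ≤ pvZeros xs := by
  intro xs; induction xs with
  | nil => simp [pvZeros]
  | cons x xs ih => simp only [pvZeros]; split_ifs <;> omega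

lemma pvZeros_pos : ∀ (xs : List Int), (0 : Int) ∈ xs → 1 ≤ pvZeros xs := by
  intro xs
  induction xs with
  | nil => intro h; simp at h
  | cons x xs ih =>
    intro h
    simp only [pvZeros]
    rcases List.mem_cons.mp h with h1 | h1
    · rw [if_pos h1.symm]; have := pvZeros_nonneg xs; omega
    · have := ih h1; split_ifs <;> omega

-- loop invariant inside D's zero case: A overcounts by exactly the number of zero signs
lemma pvMainLow (mr : Int) (hmr : mr ≤ 1) : ∀ (rest : List Int) (prev count run_len : Int),
    1 ≤ run_len →
    pvFin mr (pvALoop mr count run_len prev rest)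
      = count + pvCountRuns mr (pvRunsAux prev run_len rest) + pvZeros (prev :: rest) := by
  intro rest
  induction rest with
  | nil =>
    intro prev count run_len h1
    rw [pvALoop_nil, pvRunsAux_nil, pvCountRuns_cons]
    simp only [pvCountRuns, pvFin, pvZeros]
    rw [if_pos (by omega : run_len ≥ mr)]
    split_ifs <;> omega
  | cons s rest ih =>
    intro prev count run_len h1
    rw [pvALoop_cons, pvRunsAux_cons]
    rcases eq_or_ne s prev with hsp | hsp
    · subst hsp
      by_cases hs0 : s = 0
      · subst hs0
        rw [if_neg (by simp), if_pos rfl, if_pos (by omega : run_len ≥ mr)]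
        rw [ih 0 (count + 1) 1 (by omega)]
        rw [countRuns_runsAux_zero mr rest 1 (run_len + 1)]
        simp only [pvZeros_cons]
        split_ifs <;> omega
      · rw [if_pos ⟨hs0, rfl⟩, if_pos rfl]
        rw [ih s count (run_len + 1) (by omega)]
        simp only [pvZeros_cons]
        split_ifs
        all_goals omega
    · rw [if_neg (fun h => hsp h.2), if_neg hsp, if_pos (by omega : run_len ≥ mr)]
      rw [ih s (count + 1) 1 (by omega)]
      simp only [pvCountRuns_cons, pvZeros_cons]
      split_ifs
      all_goals omega

-- membership transfer through the sign map
lemma pvZero_mem_signs {residuals : List (Int × Int)} (r : Int × Int)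
    (hr : r ∈ residuals) (h0 : r.1 = 0) : (0 : Int) ∈ residuals.map pvSignA := by
  exact List.mem_map.mpr ⟨r, hr, by simpa [pvSignA_eq_zero]⟩

-- ===== VERDICT (by name: the statement is the Claim_ definition above) =====
theorem count_cascades_py_spec : Claim_unchanged_count_cascades_py := by
  intro residuals min_run _hdom hnd
  unfold count_cascades_py
  by_cases hlt : (residuals.length : Int) < min_run
  · rw [if_pos hlt, pvAlt_small residuals min_run hlt]
  · rw [if_neg hlt]
    cases hs : residuals.map pvSignA with
    | nil =>
      have hres : residuals = [] := by
        cases residuals with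
        | nil => rfl
        | cons a l => simp at hs
      exfalso
      apply hnd
      right
      refine ⟨?_, hres⟩
      subst hres; simp at hlt; omega
    | cons h t =>
      simp only
      rw [pvAlt_eq]
      rw [hs]
      simp only [pvRuns]
      have hH : 2 ≤ min_run ∨ (h ≠ 0 ∧ ∀ s ∈ t, s ≠ 0) := by
        by_cases hmr : 2 ≤ min_run
        · exact Or.inl hmr
        · right
          have hnz : ∀ s ∈ residuals.map pvSignA, s ≠ 0 := by
            intro s hmem hs0
            rcases List.mem_map.mp hmem with ⟨r, hr, hrs⟩
            apply hnd
            left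
            exact ⟨by omega, r, hr, pvSignA_eq_zero.mp (by rw [hrs]; exact hs0)⟩
          rw [hs] at hnz
          exact ⟨hnz h (List.mem_cons_self), fun s hsm => hnz s (List.mem_cons_of_mem _ hsm)⟩
      have := pvMain min_run t h 0 1
        (fun _ => rfl) hH
      simpa [pvFin] using this

theorem count_cascades_py_changed : Claim_changed_count_cascades_py := by
  unfold Claim_changed_count_cascades_py; decide

theorem count_cascades_py_tight : Claim_exact_count_cascades_py := by
  intro residuals min_run _hdom hd
  rcases hd with ⟨hmr, r, hr, h0⟩ | ⟨hmr, hres⟩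
  · have hne : residuals ≠ [] := by intro h; rw [h] at hr; simp at hr
    unfold count_cascades_py
    have hlen : (1 : Int) ≤ residuals.length := by
      cases residuals with
      | nil => exact absurd rfl hne
      | cons a l => simp only [List.length_cons]; omega
    rw [if_neg (by omega)]
    cases hs : residuals.map pvSignA with
    | nil =>
      exfalso; apply hne
      cases residuals with
      | nil => rfl
      | cons a l => simp at hs
    | cons h t =>
      simp only
      rw [pvAlt_eq, hs]
      simp only [pvRuns]
      have hmain := pvMainLow min_run hmr t h 0 1 (by omega)
      have hzmem : (0 : Int) ∈ residuals.map pvSignA := pvZero_mem_signs r hr h0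
      rw [hs] at hzmem
      have hzpos := pvZeros_pos _ hzmem
      simp only [pvFin] at hmain
      rw [hmain]
      intro hcontra
      omega
  · subst hres
    unfold count_cascades_py count_cascades_py_alt
    simp only [List.map_nil, List.length_nil, Nat.cast_zero]
    rw [if_neg (by omega : ¬ ((0 : Int) < min_run))]
    rw [PySem.List.enumerate_nil]
    simp only [List.foldl_nil]
    rw [if_pos (by omega : (1 : Int) ≥ min_run)]
    omega
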